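-- pv_equiv track=rewrite | github.com/accelerate-data/migration-utility | plugin/lib/shared/batch_plan.py | _compute_diagnostic_stage_flags
-- ===== SOURCE A (Python) =====
-- from typing import Any, Optional
--
-- _DIAG_STAGE_MAP: dict[str, str] = {
--     "PARSE_ERROR": "refactor",
--     "DDL_PARSE_ERROR": "refactor",
--     "MULTI_TABLE_WRITE": "scope",
--     "REMOTE_EXEC_UNSUPPORTED": "scope",
-- }
--
-- _SEV_RANK: dict[str, int] = {"warning": 0, "error": 1}
--
-- def _compute_diagnostic_stage_flags(diagnostics: list[dict[str, Any]]) -> dict[str, str]: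
--     """Map a node's diagnostics to their most-impacted pipeline stage.
--
--     Returns a dict of {stage: worst_severity} for stages with at least one
--     relevant diagnostic, e.g. {"refactor": "error"} or {"scope": "warning"}.
--     The highest-ranked severity for each stage wins (error > warning).
--     Unknown severity values are treated as lower than warning and do not
--     overwrite a known severity.
--     """
--     flags: dict[str, str] = {}
--     for d in diagnostics:
--         stage = _DIAG_STAGE_MAP.get(d.get("code", ""))
--         if not stage:
--             continue
--         sev = d.get("severity", "warning")
--         if _SEV_RANK.get(sev, -1) > _SEV_RANK.get(flags.get(stage, ""), -1):
--             flags[stage] = sev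
--     return flags
-- ===== SOURCE B (Python) =====
-- _DIAG_STAGE_MAP: dict = {
--     "PARSE_ERROR": "refactor",
--     "DDL_PARSE_ERROR": "refactor",
--     "MULTI_TABLE_WRITE": "scope",
--     "REMOTE_EXEC_UNSUPPORTED": "scope",
-- }
--
-- _SEV_RANK: dict = {"warning": 0, "error": 1}
--
--
-- def _compute_diagnostic_stage_flags(diagnostics):
--     # Two passes: group the known severities per stage, then reduce each
--     # bucket to its worst severity with max().
--     buckets: dict = {}
--     for d in diagnostics:
--         stage = _DIAG_STAGE_MAP.get(d.get("code", ""))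
--         if not stage:
--             continue
--         sev = d.get("severity", "warning")
--         if sev in _SEV_RANK:
--             buckets.setdefault(stage, []).append(sev)
--     return {stage: max(sevs, key=lambda s: _SEV_RANK.get(s, -1))
--             for stage, sevs in buckets.items()}
-- ===== Notes on version B (the rewrite author's own statement) =====
-- stated objective: alternative
-- what changed: Replaces A's single online max-reduction into the result dict by a two-pass group-then-reduce: first bucket each relevant diagnostic's known severity per stage, then reduce each bucket to its worst severity with max(key=rank).
import Mathlib
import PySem

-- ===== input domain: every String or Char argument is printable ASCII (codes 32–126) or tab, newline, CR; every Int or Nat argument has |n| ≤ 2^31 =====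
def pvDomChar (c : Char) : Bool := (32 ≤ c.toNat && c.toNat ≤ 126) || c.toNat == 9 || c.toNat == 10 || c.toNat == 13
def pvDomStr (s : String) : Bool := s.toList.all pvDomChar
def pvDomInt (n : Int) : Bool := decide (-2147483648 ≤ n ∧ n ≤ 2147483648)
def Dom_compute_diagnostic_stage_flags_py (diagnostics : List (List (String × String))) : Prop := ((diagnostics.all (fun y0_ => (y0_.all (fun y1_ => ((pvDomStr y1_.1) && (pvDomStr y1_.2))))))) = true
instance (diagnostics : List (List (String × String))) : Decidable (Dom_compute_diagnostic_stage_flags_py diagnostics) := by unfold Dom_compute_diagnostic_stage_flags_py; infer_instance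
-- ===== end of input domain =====

-- B replaces A's online per-stage max-reduction by a two-pass group-then-reduce
-- (bucket the known severities per stage, then max over each bucket); same cost, alternative decomposition.

-- ===== PORT A =====
-- module constants
def pvStageMap : PySem.Dict String String :=
  PySem.Dict.ofList [("PARSE_ERROR", "refactor"), ("DDL_PARSE_ERROR", "refactor"),
                     ("MULTI_TABLE_WRITE", "scope"), ("REMOTE_EXEC_UNSUPPORTED", "scope")]

def pvSevRank : PySem.Dict String Int := PySem.Dict.ofList [("warning", 0), ("error", 1)]

-- one iteration of A's loop body
def pvStepA (flags : PySem.Dict String String) (d : List (String × String)) : PySem.Dict String String :=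
  match pvStageMap.get? ((PySem.Dict.ofList d).getD "code" "") with
  | none => flags
  | some stage =>
    if stage = "" then flags   -- `if not stage: continue` (stage is None or empty)
    else
      if pvSevRank.getD ((PySem.Dict.ofList d).getD "severity" "warning") (-1) >
         pvSevRank.getD (flags.getD stage "") (-1)
      then flags.insert stage ((PySem.Dict.ofList d).getD "severity" "warning") else flags

def compute_diagnostic_stage_flags_py (diagnostics : List (List (String × String))) : List (String × String) :=
  (diagnostics.foldl pvStepA PySem.Dict.empty).items

-- ===== PORT B =====
-- one iteration of B's grouping loop: append the known severity to its stage's bucket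
def pvStepB (b : PySem.Dict String (List String)) (d : List (String × String)) : PySem.Dict String (List String) :=
  match pvStageMap.get? ((PySem.Dict.ofList d).getD "code" "") with
  | none => b
  | some stage =>
    if stage = "" then b
    else
      if pvSevRank.contains ((PySem.Dict.ofList d).getD "severity" "warning")
      then b.modify stage [] (· ++ [(PySem.Dict.ofList d).getD "severity" "warning"]) else b

-- max(sevs, key=lambda s: _SEV_RANK.get(s, -1))  (buckets are never empty)
def pvBestSev (sevs : List String) : String :=
  (PySem.List.max? sevs (fun s => pvSevRank.getD s (-1))).getD ""

def compute_diagnostic_stage_flags_py_alt (diagnostics : List (List (String × String))) : List (String × String) :=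
  ((diagnostics.foldl pvStepB PySem.Dict.empty).items).map (fun p => (p.1, pvBestSev p.2))

-- ===== PRECONDITION & SPEC =====
def Spec_compute_diagnostic_stage_flags_py (diagnostics : List (List (String × String))) (out : List (String × String)) : Prop := out = compute_diagnostic_stage_flags_py_alt diagnostics
instance (diagnostics : List (List (String × String))) (out : List (String × String)) : Decidable (Spec_compute_diagnostic_stage_flags_py diagnostics out) := by unfold Spec_compute_diagnostic_stage_flags_py; infer_instance

-- ===== CLAIM (what is proved, stated in full; the proofs are below) =====
def Claim_equal_compute_diagnostic_stage_flags_py : Prop := ∀ (diagnostics : List (List (String × String))), Dom_compute_diagnostic_stage_flags_py diagnostics → Spec_compute_diagnostic_stage_flags_py diagnostics (compute_diagnostic_stage_flags_py diagnostics)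

-- ===== LEMMAS AND PROOFS =====

-- A's dict state, reconstructed from B's bucket table
def pvFlagsOf (b : PySem.Dict String (List String)) : PySem.Dict String String :=
  PySem.Dict.mk (b.items.map (fun p => (p.1, pvBestSev p.2)))

-- invariant on B's state: keys nodup, buckets nonempty and all severities known
def pvInv (b : PySem.Dict String (List String)) : Prop :=
  b.keys.Nodup ∧ ∀ p ∈ b.items, p.2 ≠ [] ∧ ∀ s ∈ p.2, s = "warning" ∨ s = "error"

theorem pvItems_flagsOf (b : PySem.Dict String (List String)) :
    (pvFlagsOf b).items = b.items.map (fun p => (p.1, pvBestSev p.2)) := rfl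

theorem pvKeys_flagsOf (b : PySem.Dict String (List String)) : (pvFlagsOf b).keys = b.keys := by
  simp [pvFlagsOf, PySem.Dict.keys]

theorem pvContains_flagsOf (b : PySem.Dict String (List String)) (k : String) :
    (pvFlagsOf b).contains k = b.contains k := by
  rw [PySem.Dict.contains_eq_decide_mem_keys, PySem.Dict.contains_eq_decide_mem_keys, pvKeys_flagsOf]

theorem pvSevRank_mk : pvSevRank = PySem.Dict.mk [("warning", 0), ("error", 1)] := by rfl

theorem pvRank_known (s : String) (h : pvSevRank.contains s = true) :
    s = "warning" ∨ s = "error" := by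
  rw [pvSevRank_mk] at h; simp [PySem.Dict.contains_mk] at h; tauto

theorem pvRank_ge (s : String) : -1 ≤ pvSevRank.getD s (-1) := by
  by_cases h : pvSevRank.contains s = true
  · rcases pvRank_known s h with h' | h' <;> subst h' <;> decide
  · have h' : pvSevRank.contains s = false := by simpa using h
    rw [PySem.Dict.getD_of_not_contains _ _ h']

theorem pvBestSev_spec (l : List String) (hne : l ≠ [])
    (hs : ∀ s ∈ l, s = "warning" ∨ s = "error") :
    pvBestSev l = if "error" ∈ l then "error" else "warning" := by
  obtain ⟨m, hm⟩ : ∃ m, PySem.List.max? l (fun s => pvSevRank.getD s (-1)) = some m := by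
    cases h : PySem.List.max? l (fun s => pvSevRank.getD s (-1)) with
    | none => exact absurd ((PySem.List.max?_eq_none_iff _ _).mp h) hne
    | some m => exact ⟨m, rfl⟩
  have hmem := PySem.List.max?_mem hm
  have hmax := PySem.List.max?_isMax hm
  have hbest : pvBestSev l = m := by simp [pvBestSev, hm]
  rcases hs m hmem with hw | he
  · -- m = "warning": no "error" in l (else rank 1 ≤ rank m = 0)
    subst hw
    rw [hbest]
    have : "error" ∉ l := by
      intro hel
      have h1 := hmax _ hel
      have e1 : pvSevRank.getD "error" (-1) = 1 := by decide
      have e2 : pvSevRank.getD "warning" (-1) = 0 := by decide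
      rw [e1, e2] at h1
      omega
    simp [this]
  · subst he
    rw [hbest]
    simp [hmem]

theorem pvGetD_flagsOf_mem (b : PySem.Dict String (List String)) (hnd : b.keys.Nodup)
    {stage : String} {sevs : List String} (hmem : (stage, sevs) ∈ b.items) :
    (pvFlagsOf b).getD stage "" = pvBestSev sevs := by
  apply PySem.Dict.getD_of_mem_items
  · rw [pvItems_flagsOf]
    exact List.mem_map_of_mem hmem
  · rw [pvKeys_flagsOf]; exact hnd

theorem pvContains_of_mem (b : PySem.Dict String (List String))
    {stage : String} {sevs : List String} (hmem : (stage, sevs) ∈ b.items) :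
    b.contains stage = true := by
  rw [PySem.Dict.contains_eq_decide_mem_keys]
  simpa using PySem.Dict.mem_keys_of_mem_items b hmem

theorem pvFlagsOf_insert_mem (b : PySem.Dict String (List String)) (_hnd : b.keys.Nodup)
    {stage : String} {sevs : List String} (hmem : (stage, sevs) ∈ b.items) (v : List String) :
    pvFlagsOf (b.insert stage v) = (pvFlagsOf b).insert stage (pvBestSev v) := by
  have hc : b.contains stage = true := pvContains_of_mem b hmem
  have hc' : (pvFlagsOf b).contains stage = true := by rw [pvContains_flagsOf]; exact hc
  apply PySem.Dict.ext
  rw [PySem.Dict.items_insert_of_contains _ _ hc', pvItems_flagsOf, pvItems_flagsOf,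
      PySem.Dict.items_insert_of_contains _ _ hc]
  simp only [List.map_map]
  apply List.map_congr_left
  intro p _
  by_cases h : p.1 = stage <;> simp [h]

theorem pvFlagsOf_insert_fresh (b : PySem.Dict String (List String))
    {stage : String} (hnc : b.contains stage = false) (v : List String) :
    pvFlagsOf (b.insert stage v) = (pvFlagsOf b).insert stage (pvBestSev v) := by
  have hnc' : (pvFlagsOf b).contains stage = false := by rw [pvContains_flagsOf]; exact hnc
  apply PySem.Dict.ext
  rw [PySem.Dict.items_insert_of_not_contains _ _ hnc', pvItems_flagsOf, pvItems_flagsOf,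
      PySem.Dict.items_insert_of_not_contains _ _ hnc]
  simp

-- inserting the value the dict already holds at that key changes nothing
theorem pvInsert_self (d : PySem.Dict String String) (hnd : d.keys.Nodup)
    {k : String} {v : String} (hmem : (k, v) ∈ d.items) : d.insert k v = d := by
  have hc : d.contains k = true := by
    rw [PySem.Dict.contains_eq_decide_mem_keys]
    simpa using PySem.Dict.mem_keys_of_mem_items d hmem
  apply PySem.Dict.ext
  rw [PySem.Dict.items_insert_of_contains _ _ hc]
  conv_rhs => rw [← List.map_id d.items]
  apply List.map_congr_left
  intro p hp
  obtain ⟨p1, p2⟩ := p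
  by_cases hpk : p1 = k
  · subst hpk
    have h1 : d.get? p1 = some v := PySem.Dict.get?_of_mem_items d hmem hnd
    have h2 : d.get? p1 = some p2 := PySem.Dict.get?_of_mem_items d hp hnd
    rw [h1] at h2
    have hv : v = p2 := Option.some.inj h2
    subst hv
    simp
  · simp [hpk]

theorem pvNodup_keys_flagsOf (b : PySem.Dict String (List String)) (hnd : b.keys.Nodup) :
    (pvFlagsOf b).keys.Nodup := by rw [pvKeys_flagsOf]; exact hnd

-- the step of A, started from the reconstruction of B's state, tracks the step of B
theorem pvStep_eq (b : PySem.Dict String (List String)) (hInv : pvInv b)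
    (d : List (String × String)) :
    pvStepA (pvFlagsOf b) d = pvFlagsOf (pvStepB b d) ∧ pvInv (pvStepB b d) := by
  obtain ⟨hnd, hvals⟩ := hInv
  unfold pvStepA pvStepB
  cases hst : pvStageMap.get? ((PySem.Dict.ofList d).getD "code" "") with
  | none => exact ⟨rfl, hnd, hvals⟩
  | some stage =>
    simp only []
    by_cases hse : stage = ""
    · rw [if_pos hse, if_pos hse]; exact ⟨rfl, hnd, hvals⟩
    rw [if_neg hse, if_neg hse]
    generalize (PySem.Dict.ofList d).getD "severity" "warning" = sev
    by_cases hk : pvSevRank.contains sev = true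
    · -- known severity
      have hkw : sev = "warning" ∨ sev = "error" := pvRank_known sev hk
      rw [if_pos hk, PySem.Dict.modify]
      by_cases hc : b.contains stage = true
      · -- existing bucket
        obtain ⟨sevs, hmem⟩ : ∃ sevs, (stage, sevs) ∈ b.items := by
          rw [PySem.Dict.contains_eq_decide_mem_keys] at hc
          simp only [decide_eq_true_iff, PySem.Dict.keys, List.mem_map] at hc
          obtain ⟨p, hp, hp1⟩ := hc
          exact ⟨p.2, by rwa [← hp1, Prod.mk.eta]⟩
        have hgd : b.getD stage [] = sevs := PySem.Dict.getD_of_mem_items b hmem hnd []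
        have hvs := hvals _ hmem
        have hcur : (pvFlagsOf b).getD stage "" = pvBestSev sevs := pvGetD_flagsOf_mem b hnd hmem
        have hbs := pvBestSev_spec sevs hvs.1 hvs.2
        have hall : ∀ s ∈ sevs ++ [sev], s = "warning" ∨ s = "error" := by
          intro s hs
          rcases List.mem_append.mp hs with h | h
          · exact hvs.2 s h
          · simp at h; subst h; exact hkw
        have hbs' := pvBestSev_spec (sevs ++ [sev]) (by simp) hall
        have hInv' : pvInv (b.insert stage (b.getD stage [] ++ [sev])) := by
          refine ⟨PySem.Dict.nodup_keys_insert _ _ _ hnd, ?_⟩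
          intro p hp
          rcases (PySem.Dict.mem_items_insert _ _ _ _).mp hp with hp | hp
          · subst hp
            refine ⟨?_, ?_⟩
            · show b.getD stage [] ++ [sev] ≠ []
              simp
            · show ∀ s ∈ b.getD stage [] ++ [sev], s = "warning" ∨ s = "error"
              rw [hgd]; exact hall
          · exact hvals _ hp.1
        refine ⟨?_, hInv'⟩
        rw [hgd, pvFlagsOf_insert_mem b hnd hmem, hcur]
        by_cases herr : "error" ∈ sevs
        · -- stage already at "error": A keeps it, B's bucket best stays "error"
          have h1 : pvBestSev sevs = "error" := by rw [hbs, if_pos herr]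
          have h2 : pvBestSev (sevs ++ [sev]) = "error" := by
            rw [hbs', if_pos (List.mem_append_left _ herr)]
          have hcmp : ¬ (pvSevRank.getD sev (-1) > pvSevRank.getD (pvBestSev sevs) (-1)) := by
            rw [h1]
            rcases hkw with h | h <;> subst h <;> decide
          rw [if_neg hcmp, h2, ← h1]
          exact (pvInsert_self (pvFlagsOf b) (pvNodup_keys_flagsOf b hnd)
            (by rw [pvItems_flagsOf]; exact List.mem_map_of_mem hmem)).symm
        · have h1 : pvBestSev sevs = "warning" := by rw [hbs, if_neg herr]
          rcases hkw with h | h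
          · -- another "warning": nothing changes on either side
            subst h
            have h2 : pvBestSev (sevs ++ ["warning"]) = "warning" := by
              rw [hbs', if_neg (by simp [herr])]
            have hcmp : ¬ (pvSevRank.getD "warning" (-1) > pvSevRank.getD (pvBestSev sevs) (-1)) := by
              rw [h1]; decide
            rw [if_neg hcmp, h2, ← h1]
            exact (pvInsert_self (pvFlagsOf b) (pvNodup_keys_flagsOf b hnd)
              (by rw [pvItems_flagsOf]; exact List.mem_map_of_mem hmem)).symm
          · -- an "error" arrives: both sides upgrade the stage to "error"
            subst h
            have h2 : pvBestSev (sevs ++ ["error"]) = "error" := by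
              rw [hbs', if_pos (by simp)]
            have hcmp : pvSevRank.getD "error" (-1) > pvSevRank.getD (pvBestSev sevs) (-1) := by
              rw [h1]; decide
            rw [if_pos hcmp, h2]
      · -- fresh stage
        have hc' : b.contains stage = false := by simpa using hc
        have hgd : b.getD stage [] = [] := PySem.Dict.getD_of_not_contains b [] hc'
        have hcur : (pvFlagsOf b).getD stage "" = "" := by
          apply PySem.Dict.getD_of_not_contains
          rw [pvContains_flagsOf]; exact hc'
        have hbs : pvBestSev ([] ++ [sev]) = sev := by
          rw [pvBestSev_spec _ (by simp) (by intro s hs; simp at hs; subst hs; exact hkw)]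
          rcases hkw with h | h <;> subst h <;> simp
        have hcmp : pvSevRank.getD sev (-1) > pvSevRank.getD ((pvFlagsOf b).getD stage "") (-1) := by
          rw [hcur]
          rcases hkw with h | h <;> subst h <;> decide
        have hInv' : pvInv (b.insert stage (b.getD stage [] ++ [sev])) := by
          refine ⟨PySem.Dict.nodup_keys_insert _ _ _ hnd, ?_⟩
          intro p hp
          rcases (PySem.Dict.mem_items_insert _ _ _ _).mp hp with hp | hp
          · subst hp
            refine ⟨by simp, ?_⟩
            intro s hs
            rw [hgd] at hs
            simp at hs; subst hs; exact hkw
          · exact hvals _ hp.1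
        refine ⟨?_, hInv'⟩
        rw [if_pos hcmp, pvFlagsOf_insert_fresh b hc', hgd, hbs]
    · -- unknown severity: neither side changes state
      have hk' : pvSevRank.contains sev = false := by simpa using hk
      have hcmp : ¬ (pvSevRank.getD sev (-1) > pvSevRank.getD ((pvFlagsOf b).getD stage "") (-1)) := by
        rw [PySem.Dict.getD_of_not_contains _ _ hk']
        have := pvRank_ge ((pvFlagsOf b).getD stage "")
        omega
      rw [if_neg hcmp, if_neg (by simpa using hk)]
      exact ⟨rfl, hnd, hvals⟩

theorem pvFold_eq (ds : List (List (String × String))) (b : PySem.Dict String (List String))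
    (hInv : pvInv b) :
    ds.foldl pvStepA (pvFlagsOf b) = pvFlagsOf (ds.foldl pvStepB b) := by
  induction ds generalizing b with
  | nil => rfl
  | cons d ds ih =>
    obtain ⟨hstep, hInv'⟩ := pvStep_eq b hInv d
    simp only [List.foldl_cons, hstep]
    exact ih _ hInv'

-- ===== VERDICT (by name: the statement is the Claim_ definition above) =====
theorem compute_diagnostic_stage_flags_py_spec : Claim_equal_compute_diagnostic_stage_flags_py := by
  intro ds _
  unfold Spec_compute_diagnostic_stage_flags_py
  unfold compute_diagnostic_stage_flags_py compute_diagnostic_stage_flags_py_alt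
  have h0 : pvInv PySem.Dict.empty :=
    ⟨by simp [PySem.Dict.empty, PySem.Dict.keys], by simp [PySem.Dict.empty]⟩
  have he : (PySem.Dict.empty : PySem.Dict String String) = pvFlagsOf PySem.Dict.empty := rfl
  rw [he, pvFold_eq ds PySem.Dict.empty h0, pvItems_flagsOf]
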